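-- pv_equiv track=rewrite | github.com/Aladin147/Coda | src/coda/components/personality/session_manager.py | _extract_session_topics
-- ===== SOURCE A (Python) =====
-- from typing import Any, Dict, List, Optional, Tuple
--
-- def _extract_session_topics(content: str) -> List[str]:
--     """Extract main topics from session content."""
--     # Simple keyword-based topic extraction
--     words = content.lower().split()
--
--     # Common topic keywords
--     topic_keywords = {
--         "programming": ["code", "programming", "python", "javascript", "software"],
--         "learning": ["learn", "study", "understand", "explain", "teach"],
--         "creative": ["create", "design", "art", "music", "write"],
--         "personal": ["feel", "think", "personal", "life", "experience"],
--         "work": ["work", "job", "business", "project", "career"],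
--         "technology": ["technology", "computer", "ai", "machine", "data"],
--     }
--
--     detected_topics = []
--     for topic, keywords in topic_keywords.items():
--         if any(keyword in words for keyword in keywords):
--             detected_topics.append(topic)
--
--     return detected_topics[:5]  # Return top 5 topics
-- ===== SOURCE B (Python) =====
-- from typing import List
--
-- _PROG = ("code", "programming", "python", "javascript", "software")
-- _LEARN = ("learn", "study", "understand", "explain", "teach")
-- _CREATIVE = ("create", "design", "art", "music", "write")
-- _PERSONAL = ("feel", "think", "personal", "life", "experience")
-- _WORK = ("work", "job", "business", "project", "career")
-- _TECH = ("technology", "computer", "ai", "machine", "data")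
--
--
-- def _extract_session_topics(content: str) -> List[str]:
--     """Extract main topics: one pass over words, six boolean flags, then build the list."""
--     prog = learn = crea = pers = work = tech = False
--     for w in content.lower().split():
--         prog = prog or w in _PROG
--         learn = learn or w in _LEARN
--         crea = crea or w in _CREATIVE
--         pers = pers or w in _PERSONAL
--         work = work or w in _WORK
--         tech = tech or w in _TECH
--     topics = []
--     if prog:
--         topics.append("programming")
--     if learn:
--         topics.append("learning")
--     if crea:
--         topics.append("creative")
--     if pers:
--         topics.append("personal")
--     if work:
--         topics.append("work")
--     if tech:
--         topics.append("technology")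
--     return topics[:5]
-- ===== Notes on version B (the rewrite author's own statement) =====
-- stated objective: alternative
-- what changed: Replaced A's per-topic scans of the word list (for each of 6 topics, test each of its 5 keywords with an 'in words' scan) by a single pass over the words that maintains six boolean flags (one per topic), after which the result list is assembled from the flags in fixed topic order and sliced to 5.
import Mathlib
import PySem

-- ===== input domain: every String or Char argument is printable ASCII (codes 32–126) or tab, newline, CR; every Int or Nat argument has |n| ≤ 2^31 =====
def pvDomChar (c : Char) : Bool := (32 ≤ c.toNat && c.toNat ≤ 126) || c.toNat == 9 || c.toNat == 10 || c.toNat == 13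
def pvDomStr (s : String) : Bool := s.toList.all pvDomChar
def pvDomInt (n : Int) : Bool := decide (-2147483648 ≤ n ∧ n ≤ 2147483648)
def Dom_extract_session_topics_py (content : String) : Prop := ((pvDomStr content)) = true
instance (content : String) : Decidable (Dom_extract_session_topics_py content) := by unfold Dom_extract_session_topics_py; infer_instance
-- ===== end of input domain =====

-- B replaces A's per-topic scans of the word list by a single pass over the words maintaining six per-topic boolean flags (objective: alternative).

-- ===== PORT A =====
def pvTopicKeywords : List (String × List String) :=
  [("programming", ["code", "programming", "python", "javascript", "software"]),
   ("learning", ["learn", "study", "understand", "explain", "teach"]),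
   ("creative", ["create", "design", "art", "music", "write"]),
   ("personal", ["feel", "think", "personal", "life", "experience"]),
   ("work", ["work", "job", "business", "project", "career"]),
   ("technology", ["technology", "computer", "ai", "machine", "data"])]

def extract_session_topics_py (content : String) : List String :=
  let words := PySem.Str.split₀ (PySem.Str.lower content)
  let detected_topics := pvTopicKeywords.foldl
    (fun acc tk => if tk.2.any (fun keyword => words.contains keyword) then acc ++ [tk.1] else acc) []
  detected_topics.take 5

-- ===== PORT B =====
-- six per-topic flags, one pass over the words (mirrors Source B's loop)
def pvFlags : Type := Bool × Bool × Bool × Bool × Bool × Bool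

def pvStepB (f : pvFlags) (w : String) : pvFlags :=
  (f.1 || ["code", "programming", "python", "javascript", "software"].contains w,
   f.2.1 || ["learn", "study", "understand", "explain", "teach"].contains w,
   f.2.2.1 || ["create", "design", "art", "music", "write"].contains w,
   f.2.2.2.1 || ["feel", "think", "personal", "life", "experience"].contains w,
   f.2.2.2.2.1 || ["work", "job", "business", "project", "career"].contains w,
   f.2.2.2.2.2 || ["technology", "computer", "ai", "machine", "data"].contains w)

def extract_session_topics_py_alt (content : String) : List String :=
  let f := (PySem.Str.split₀ (PySem.Str.lower content)).foldl pvStepB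
             (false, false, false, false, false, false)
  ((if f.1 then ["programming"] else []) ++
   (if f.2.1 then ["learning"] else []) ++
   (if f.2.2.1 then ["creative"] else []) ++
   (if f.2.2.2.1 then ["personal"] else []) ++
   (if f.2.2.2.2.1 then ["work"] else []) ++
   (if f.2.2.2.2.2 then ["technology"] else [])).take 5

-- ===== PRECONDITION & SPEC =====
def Spec_extract_session_topics_py (content : String) (out : List String) : Prop := out = extract_session_topics_py_alt content
instance (content : String) (out : List String) : Decidable (Spec_extract_session_topics_py content out) := by unfold Spec_extract_session_topics_py; infer_instance

-- ===== CLAIM =====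
def Claim_equal_extract_session_topics_py : Prop := ∀ (content : String), Dom_extract_session_topics_py content → Spec_extract_session_topics_py content (extract_session_topics_py content)

-- ===== LEMMAS AND PROOFS =====

-- the fold of pvStepB computes, for each flag, "initial flag or some word is a keyword of that topic"
theorem pv_fold_flags (ws : List String) (f : pvFlags) :
    ws.foldl pvStepB f =
      (f.1 || ws.any (["code", "programming", "python", "javascript", "software"].contains ·),
       f.2.1 || ws.any (["learn", "study", "understand", "explain", "teach"].contains ·),
       f.2.2.1 || ws.any (["create", "design", "art", "music", "write"].contains ·),
       f.2.2.2.1 || ws.any (["feel", "think", "personal", "life", "experience"].contains ·),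
       f.2.2.2.2.1 || ws.any (["work", "job", "business", "project", "career"].contains ·),
       f.2.2.2.2.2 || ws.any (["technology", "computer", "ai", "machine", "data"].contains ·)) := by
  induction ws generalizing f with
  | nil => simp
  | cons w ws ih => simp [ih, pvStepB, Bool.or_assoc]

-- the two membership orders agree: 'some word is among the keywords' = 'some keyword is among the words'
theorem pv_any_swap (ws ks : List String) :
    ws.any (ks.contains ·) = ks.any (fun keyword => ws.contains keyword) := by
  rw [Bool.eq_iff_iff]
  simp only [List.any_eq_true, List.contains_iff_mem]
  exact ⟨fun ⟨w, hw, hk⟩ => ⟨w, hk, hw⟩, fun ⟨k, hk, hw⟩ => ⟨k, hw, hk⟩⟩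

-- ===== VERDICT =====
theorem extract_session_topics_py_spec : Claim_equal_extract_session_topics_py := by
  intro content _
  unfold Spec_extract_session_topics_py extract_session_topics_py extract_session_topics_py_alt
  set words := PySem.Str.split₀ (PySem.Str.lower content) with hw
  rw [pv_fold_flags]
  simp only [pvTopicKeywords, List.foldl, Bool.false_or, pv_any_swap]
  split_ifs <;> rfl
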